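-- pv_equiv track=rewrite | github.com/lauridsj/CombineHarvester | ahtt/scripts/utilspy.py | elementwise_add
-- ===== SOURCE A (Python) =====
-- def elementwise_add(list_of_lists):
--     '''
--     input: [[a, b, c], [1, 2, 3], [...]]
--     output: [a + 1 + ..., b + 2 + ..., c + 3 + ...]
--     '''
--     if len(list_of_lists) < 1 or any(len(ll) < 1 or len(ll) != len(list_of_lists[0]) for ll in list_of_lists):
--         raise RuntimeError("this method assumes that the argument is a list of lists of nonzero equal lengths!!!")
--
--     result = list(list_of_lists[0])
--     for ll in range(1, len(list_of_lists)):
--         for rr in range(len(result)):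
--             result[rr] += list_of_lists[ll][rr]
--
--     return result
-- ===== SOURCE B (Python) =====
-- def _fold_add(col):
--     it = iter(col)
--     acc = next(it)
--     for x in it:
--         acc = acc + x
--     return acc
--
-- def elementwise_add(list_of_lists):
--     if len(list_of_lists) < 1 or any(len(ll) < 1 or len(ll) != len(list_of_lists[0]) for ll in list_of_lists):
--         raise RuntimeError("this method assumes that the argument is a list of lists of nonzero equal lengths!!!")
--
--     return [_fold_add(col) for col in zip(*list_of_lists)]
-- ===== Notes on version B (the rewrite author's own statement) =====
-- stated objective: alternative
-- what changed: Same length guard, but the result is built column-first: the input is transposed with zip(*...) and each column is reduced by a left fold starting from its first element, instead of A's row-by-row in-place accumulation into a mutated copy of the first row.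
import Mathlib
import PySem

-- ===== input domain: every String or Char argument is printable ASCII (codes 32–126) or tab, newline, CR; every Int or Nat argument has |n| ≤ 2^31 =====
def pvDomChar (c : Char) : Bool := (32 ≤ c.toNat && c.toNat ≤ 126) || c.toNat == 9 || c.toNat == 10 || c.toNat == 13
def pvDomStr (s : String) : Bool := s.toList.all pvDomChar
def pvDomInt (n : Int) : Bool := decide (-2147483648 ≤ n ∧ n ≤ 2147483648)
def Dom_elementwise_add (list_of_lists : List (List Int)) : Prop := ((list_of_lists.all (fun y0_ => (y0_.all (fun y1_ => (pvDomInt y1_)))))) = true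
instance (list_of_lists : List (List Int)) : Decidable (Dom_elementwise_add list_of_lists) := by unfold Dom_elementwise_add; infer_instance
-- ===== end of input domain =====

-- B traverses the data column-first (zip-transpose + per-column left fold) instead of
-- A's row-by-row accumulation into a mutated copy of the first row; objective: alternative.

-- ===== PORT A =====
-- inner loop 'for rr in range(len(result)): result[rr] += list_of_lists[ll][rr]'
def pvAddRow (result row : List Int) : List Int :=
  (List.range result.length).foldl
    (fun res rr => res.set rr (res.getD rr 0 + row.getD rr 0)) result

def elementwise_add (list_of_lists : List (List Int)) : List Int :=
  if list_of_lists.length < 1 ∨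
      list_of_lists.any
        (fun ll => decide (ll.length < 1) || decide (ll.length ≠ (list_of_lists.headD []).length)) then
    []  -- Python raises RuntimeError here; excluded by Pre_elementwise_add
  else
    -- result = list(list_of_lists[0]); for ll in range(1, len): inner loop
    (list_of_lists.tail).foldl pvAddRow (list_of_lists.headD [])

-- ===== PORT B =====
-- hand port of Python's zip(*rows): columns until some row is exhausted
def pvZipCols (rows : List (List Int)) : List (List Int) :=
  if rows.isEmpty then []
  else if rows.any (fun x => x.isEmpty) then []
  else (rows.map (fun x => x.headD 0)) :: pvZipCols (rows.map (fun x => x.tail))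
termination_by (rows.headD []).length
decreasing_by
  rename_i h1 h2
  match rows with
  | r :: rest =>
    simp only [List.any_cons, Bool.or_eq_true, not_or] at h2
    match r with
    | [] => simp at h2
    | a :: r' => simp [List.headD]

-- '_fold_add(col)': acc = first element, then acc = acc + x over the rest
def pvFoldAdd (col : List Int) : Int :=
  (col.tail).foldl (· + ·) (col.headD 0)

def elementwise_add_alt (list_of_lists : List (List Int)) : List Int :=
  if list_of_lists.length < 1 ∨
      list_of_lists.any
        (fun ll => decide (ll.length < 1) || decide (ll.length ≠ (list_of_lists.headD []).length)) then
    []  -- Python raises RuntimeError here; excluded by Pre_elementwise_add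
  else
    (pvZipCols list_of_lists).map pvFoldAdd

-- ===== PRECONDITION & SPEC =====
-- Pre_ excludes exactly the inputs on which A raises RuntimeError: an empty outer list,
-- or an inner list that is empty or of a different length than the first.
def Pre_elementwise_add (list_of_lists : List (List Int)) : Prop :=
  list_of_lists ≠ [] ∧
  ∀ ll ∈ list_of_lists, ll ≠ [] ∧ ll.length = (list_of_lists.headD []).length

instance (list_of_lists : List (List Int)) : Decidable (Pre_elementwise_add list_of_lists) := by
  unfold Pre_elementwise_add; infer_instance

def pvWitness_elementwise_add : List (List Int) := [[1, 2], [3, 4], [5, -6]]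

def Spec_elementwise_add (list_of_lists : List (List Int)) (out : List Int) : Prop := out = elementwise_add_alt list_of_lists
instance (list_of_lists : List (List Int)) (out : List Int) : Decidable (Spec_elementwise_add list_of_lists out) := by unfold Spec_elementwise_add; infer_instance

-- ===== CLAIM (what is proved, stated in full; the proofs are below) =====
def Claim_equal_elementwise_add : Prop := ∀ (list_of_lists : List (List Int)), Dom_elementwise_add list_of_lists → Pre_elementwise_add list_of_lists → Spec_elementwise_add list_of_lists (elementwise_add list_of_lists)

-- ===== LEMMAS AND PROOFS =====

-- folding zipWith from an empty accumulator stays empty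
lemma foldl_zipWith_nil (t : List (List Int)) :
    t.foldl (fun a r => List.zipWith (· + ·) a r) ([] : List Int) = [] := by
  induction t with
  | nil => rfl
  | cons r t ih2 => simpa using ih2

-- folding sets at indices j+1 over a cons cell keeps the head and acts on the tail
lemma foldl_set_succ (js : List Nat) (g : Nat → Int) (c : Int) (res : List Int) :
    js.foldl (fun r j => r.set (j + 1) (r.getD (j + 1) 0 + g (j + 1))) (c :: res)
      = c :: js.foldl (fun r j => r.set j (r.getD j 0 + g (j + 1))) res := by
  induction js generalizing c res with
  | nil => rfl
  | cons j js ih =>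
      simp only [List.foldl_cons, List.set_cons_succ, List.getD_cons_succ]
      exact ih _ _

-- A's inner index loop is elementwise addition when the row is long enough
lemma pvAddRow_eq_zipWith (res row : List Int) (h : res.length = row.length) :
    pvAddRow res row = List.zipWith (· + ·) res row := by
  induction res generalizing row with
  | nil => cases row <;> simp [pvAddRow] at h ⊢
  | cons a res ih =>
      cases row with
      | nil => simp at h
      | cons b row =>
          simp only [List.length_cons, Nat.succ_inj] at h
          simp only [pvAddRow, List.length_cons, List.range_succ_eq_map,
            List.foldl_cons, List.foldl_map, List.set_cons_zero, List.getD_cons_zero,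
            List.zipWith_cons_cons]
          rw [foldl_set_succ (g := fun j => (b :: row).getD j 0)]
          congr 1
          have := ih row h
          simpa [pvAddRow, List.foldl_map, List.getD_cons_succ] using this

lemma foldl_pvAddRow_eq (t : List (List Int)) (h : List Int)
    (hl : ∀ r ∈ t, r.length = h.length) :
    t.foldl pvAddRow h = t.foldl (fun a r => List.zipWith (· + ·) a r) h := by
  induction t generalizing h with
  | nil => rfl
  | cons r t ih =>
      have hr : r.length = h.length := hl r (by simp)
      simp only [List.foldl_cons]
      rw [pvAddRow_eq_zipWith h r hr.symm]
      exact ih _ (by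
        intro x hx
        have := hl x (by simp [hx])
        simpa [List.length_zipWith, hr] using this)

-- folding zipWith over a cons-shaped accumulator splits into head fold and tail fold
lemma foldl_zipWith_cons (t : List (List Int)) (a : Int) (h' : List Int)
    (hne : ∀ r ∈ t, r ≠ []) :
    t.foldl (fun acc r => List.zipWith (· + ·) acc r) (a :: h')
      = ((t.map (fun r => r.headD 0)).foldl (· + ·) a)
        :: ((t.map (fun r => r.tail)).foldl (fun acc r => List.zipWith (· + ·) acc r) h') := by
  induction t generalizing a h' with
  | nil => rfl
  | cons r t ih =>
      cases r with
      | nil => exact absurd rfl (hne [] (by simp))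
      | cons b r' =>
          simp only [List.foldl_cons, List.zipWith_cons_cons, List.map_cons,
            List.headD, List.tail_cons]
          exact ih _ _ (fun x hx => hne x (by simp [hx]))

-- main bridge: row-wise zipWith folding equals column-wise reduce over the transpose
lemma fold_rows_eq_cols (h : List Int) (t : List (List Int))
    (hl : ∀ r ∈ t, r.length = h.length) :
    t.foldl (fun a r => List.zipWith (· + ·) a r) h
      = (pvZipCols (h :: t)).map pvFoldAdd := by
  induction h generalizing t with
  | nil =>
      rw [foldl_zipWith_nil, pvZipCols]
      simp
  | cons a h' ih =>
      have hne : ∀ r ∈ t, r ≠ [] := by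
        intro r hr hnil
        have := hl r hr
        simp [hnil] at this
      rw [foldl_zipWith_cons t a h' hne, pvZipCols]
      have hany : ((a :: h') :: t).any (fun x => x.isEmpty) = false := by
        simp only [List.any_eq_false]
        intro x hx
        rcases List.mem_cons.mp hx with rfl | hx
        · simp
        · simpa [List.isEmpty_iff] using hne x hx
      simp only [List.isEmpty_cons, if_false, hany, Bool.false_eq_true, if_false,
        List.map_cons, List.headD, List.tail_cons]
      rw [ih (t.map (fun r => r.tail)) ?_]
      · simp [pvFoldAdd]
      · intro r hr
        rcases List.mem_map.mp hr with ⟨x, hx, rfl⟩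
        have hxl := hl x hx
        have := hne x hx
        cases x with
        | nil => simp at this
        | cons y ys => simpa using hxl

-- ===== VERDICT (by name: the statement is the Claim_ definition above) =====
theorem elementwise_add_spec : Claim_equal_elementwise_add := by
  intro l _ hpre
  obtain ⟨hne, hall⟩ := hpre
  unfold Spec_elementwise_add elementwise_add elementwise_add_alt
  have hguard : ¬ (l.length < 1 ∨
      l.any (fun ll => decide (ll.length < 1) || decide (ll.length ≠ (l.headD []).length))) := by
    rintro (hlt | hany)
    · exact absurd (List.length_pos_iff.mpr hne) (by omega)
    · rcases List.any_eq_true.mp hany with ⟨x, hx, hxp⟩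
      obtain ⟨hx1, hx2⟩ := hall x hx
      have hp : 0 < x.length := List.length_pos_iff.mpr hx1
      simp only [Bool.or_eq_true, decide_eq_true_eq] at hxp
      rcases hxp with h | h
      · omega
      · exact h hx2
  rw [if_neg hguard, if_neg hguard]
  cases l with
  | nil => exact absurd rfl hne
  | cons h t =>
      simp only [List.tail_cons, List.headD]
      have hl : ∀ r ∈ t, r.length = h.length := by
        intro r hr
        exact (hall r (by simp [hr])).2
      rw [foldl_pvAddRow_eq t h hl]
      exact fold_rows_eq_cols h t hl
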